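-- pv_equiv track=rewrite | github.com/jafaarIN/Projects | Auto_Suggestor/main.py | chunkdata
-- ===== SOURCE A (Python) =====
-- ignoreset = [".", ",", "!", "'", '"', "?"]
--
-- def chunkdata(data):
--     words = []
--     currentword = ""
--     for letter in data:
--         if letter == " ":
--             words.append(currentword)
--             currentword = ""
--         elif letter not in ignoreset:
--             currentword += letter
--
--     if currentword != "":
--         words.append(currentword)
--     return words
-- ===== SOURCE B (Python) =====
-- ignoreset = [".", ",", "!", "'", '"', "?"]
--
-- def chunkdata(data):
--     cleaned = data.translate({ord(c): None for c in ignoreset})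
--     parts = cleaned.split(" ")
--     if parts[-1] == "":
--         parts.pop()
--     return parts
-- ===== Notes on version B (the rewrite author's own statement) =====
-- stated objective: idiomatic
-- what changed: Replaces A's character-by-character accumulator loop with a preprocessing pass that deletes the six punctuation characters (str.translate), a single library split on the space character, and dropping the one trailing empty piece.
import Mathlib
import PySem

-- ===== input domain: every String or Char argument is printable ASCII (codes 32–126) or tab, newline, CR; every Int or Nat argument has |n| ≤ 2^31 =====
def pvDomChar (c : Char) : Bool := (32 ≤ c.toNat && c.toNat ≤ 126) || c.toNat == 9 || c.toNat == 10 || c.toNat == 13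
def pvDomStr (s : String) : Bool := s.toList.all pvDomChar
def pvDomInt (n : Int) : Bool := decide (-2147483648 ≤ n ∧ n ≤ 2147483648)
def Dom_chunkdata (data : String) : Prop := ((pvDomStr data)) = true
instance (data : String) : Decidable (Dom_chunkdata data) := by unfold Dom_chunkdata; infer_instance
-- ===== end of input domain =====

-- B replaces A's per-character flush loop by deleting the punctuation characters, one library
-- split on " " and dropping the single trailing empty piece (objective: idiomatic; the loop work moves into C-level str methods).

-- ===== PORT A =====
def ignoreChars : List Char := ['.', ',', '!', '\'', '"', '?']

def chunkStep (st : List String × List Char) (letter : Char) : List String × List Char :=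
  if letter = ' ' then (st.1 ++ [String.ofList st.2], [])
  else if letter ∉ ignoreChars then (st.1, st.2 ++ [letter])
  else st

def chunkdata (data : String) : List String :=
  let st := data.toList.foldl chunkStep ([], [])
  if st.2 ≠ [] then st.1 ++ [String.ofList st.2] else st.1

-- ===== PORT B =====
def chunkdata_alt (data : String) : List String :=
  let cleaned := data.toList.filter (fun c => c ∉ ignoreChars)  -- data.translate deleting ignoreset
  let parts := (PySem.Chars.splitOn cleaned [' ']).map (fun w => String.ofList w)
  if parts.getLast? = some "" then parts.dropLast else parts

-- ===== PRECONDITION & SPEC =====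
def Spec_chunkdata (data : String) (out : List String) : Prop := out = chunkdata_alt data
instance (data : String) (out : List String) : Decidable (Spec_chunkdata data out) := by unfold Spec_chunkdata; infer_instance

-- ===== CLAIM (what is proved, stated in full; the proofs are below) =====
def Claim_equal_chunkdata : Prop := ∀ (data : String), Dom_chunkdata data → Spec_chunkdata data (chunkdata data)

-- ===== LEMMAS AND PROOFS =====

-- simple single-space splitter, the proof-side characterisation of split(" ")
def splitSp : List Char → List (List Char)
  | [] => [[]]
  | c :: t => if c = ' ' then [] :: splitSp t else (splitSp t).modifyHead (c :: ·)

theorem splitSp_ne_nil (cs : List Char) : splitSp cs ≠ [] := by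
  induction cs with
  | nil => simp [splitSp]
  | cons c t ih =>
    simp only [splitSp]
    split_ifs
    · simp
    · cases h : splitSp t with
      | nil => exact absurd h ih
      | cons a l => simp [List.modifyHead]

theorem go_spec (l : List Char) : ∀ (cur : List Char) (acc : List (List Char)),
    PySem.Chars.splitOn.go [' '] (l.length + 1) l cur acc
      = acc.reverse ++ (splitSp l).modifyHead (cur.reverse ++ ·) := by
  induction l with
  | nil => intro cur acc; simp [PySem.Chars.splitOn.go, splitSp]
  | cons c t ih =>
    intro cur acc
    rw [PySem.Chars.splitOn.go]
    by_cases hc : c = ' '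
    · subst hc
      simp only [List.isPrefixOf, BEq.rfl, Bool.true_and, List.length_cons, if_pos,
        List.length_nil, Nat.zero_add, List.drop_succ_cons, List.drop_zero]
      rw [ih]
      cases h : splitSp t with
      | nil => exact absurd h (splitSp_ne_nil t)
      | cons a lres => simp [splitSp, h, List.modifyHead]
    · have hpre : [' '].isPrefixOf (c :: t) = false := by
        simp [List.isPrefixOf]; exact fun h => hc h.symm
      simp only [List.length_cons, hpre, if_false, Bool.false_eq_true]
      rw [ih]
      cases h : splitSp t with
      | nil => exact absurd h (splitSp_ne_nil t)
      | cons a lres => simp [splitSp, hc, h, List.modifyHead]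

theorem splitOn_sp (l : List Char) : PySem.Chars.splitOn l [' '] = splitSp l := by
  rw [PySem.Chars.splitOn, go_spec]
  cases h : splitSp l with
  | nil => exact absurd h (splitSp_ne_nil l)
  | cons a lres => simp [List.modifyHead]

-- A's finishing step on the char-list level
def finishParts (parts : List (List Char)) : List String :=
  (if parts.getLast? = some [] then parts.dropLast else parts).map (fun w => String.ofList w)

theorem finishParts_cons (a : List Char) (rest : List (List Char)) (h : rest ≠ []) :
    finishParts (a :: rest) = String.ofList a :: finishParts rest := by
  cases rest with
  | nil => exact absurd rfl h
  | cons b l =>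
    unfold finishParts
    rw [List.getLast?_cons_cons, List.dropLast_cons₂]
    split_ifs <;> simp

theorem loop_spec (cs : List Char) : ∀ (words : List String) (cur : List Char),
    (let st := cs.foldl chunkStep (words, cur)
     if st.2 ≠ [] then st.1 ++ [String.ofList st.2] else st.1)
      = words ++ finishParts ((splitSp (cs.filter (fun c => c ∉ ignoreChars))).modifyHead (cur ++ ·)) := by
  induction cs with
  | nil =>
    intro words cur
    simp only [List.foldl_nil, List.filter_nil, splitSp, List.modifyHead, finishParts]
    by_cases h : cur = [] <;> simp [h]
  | cons c t ih =>
    intro words cur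
    simp only [List.foldl_cons]
    by_cases hsp : c = ' '
    · subst hsp
      rw [List.filter_cons_of_pos (by simp [ignoreChars])]
      simp only [chunkStep, reduceIte]
      rw [ih]
      simp only [splitSp, reduceIte]
      cases h : splitSp (t.filter (fun c => decide (c ∉ ignoreChars))) with
      | nil => exact absurd h (splitSp_ne_nil _)
      | cons a rest =>
        simp only [List.modifyHead, List.nil_append, List.append_nil]
        rw [finishParts_cons cur (a :: rest) (by simp), List.append_assoc]
        simp
    · by_cases hig : c ∈ ignoreChars
      · rw [List.filter_cons_of_neg (by simpa using hig)]
        simp only [chunkStep, if_neg hsp, if_neg (not_not_intro hig)]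
        exact ih words cur
      · rw [List.filter_cons_of_pos (by simpa using hig)]
        simp only [chunkStep, if_neg hsp, if_pos hig]
        rw [ih]
        simp only [splitSp, if_neg hsp]
        cases h : splitSp (t.filter (fun c => decide (c ∉ ignoreChars))) with
        | nil => exact absurd h (splitSp_ne_nil _)
        | cons a rest =>
          simp [List.modifyHead]

theorem alt_finish (data : String) :
    chunkdata_alt data
      = finishParts (splitSp (data.toList.filter (fun c => c ∉ ignoreChars))) := by
  simp only [chunkdata_alt, finishParts, splitOn_sp]
  set parts := splitSp (data.toList.filter (fun c => c ∉ ignoreChars)) with hp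
  have hlast : (parts.map (fun w => String.ofList w)).getLast? = parts.getLast?.map (fun w => String.ofList w) :=
    List.getLast?_map
  by_cases h : parts.getLast? = some []
  · have hmk : String.ofList ([] : List Char) = "" := rfl
    simp [hlast, h, hmk, List.map_dropLast]
  · rw [hlast, if_neg, if_neg h]
    intro hcon
    cases hq : parts.getLast? with
    | none => simp [hq] at hcon
    | some w =>
      rw [hq] at hcon
      simp only [Option.map_some, Option.some.injEq] at hcon
      exact h (by rw [hq, String.ofList_inj.mp hcon])

-- ===== VERDICT (by name: the statement is the Claim_ definition above) =====
theorem chunkdata_spec : Claim_equal_chunkdata := by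
  intro data _
  unfold Spec_chunkdata chunkdata
  rw [loop_spec, alt_finish]
  cases h : splitSp (data.toList.filter (fun c => c ∉ ignoreChars)) with
  | nil => exact absurd h (splitSp_ne_nil _)
  | cons a rest => simp [List.modifyHead]
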